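-- pv_equiv track=rewrite | github.com/matthiasware/leetcode | python/src/0076_minimum_window_substring.py | has_dct_subset_keys_with_values_less_equal
-- ===== SOURCE A (Python) =====
-- def has_dct_subset_keys_with_values_less_equal(m1: dict[str: int],
--                                                m2: dict[str: int]) -> bool:
--     for k, v in m1.items():
--         if k in m2:
--             if v > m2[k]:
--                 return False
--         else:
--             return False
--     return True
-- ===== SOURCE B (Python) =====
-- def has_dct_subset_keys_with_values_less_equal(m1: dict[str: int],
--                                                m2: dict[str: int]) -> bool:
--     xs = sorted(m1.items(), key=lambda p: p[0])
--     ys = sorted(m2.items(), key=lambda p: p[0])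
--     i = 0
--     for k, v in xs:
--         while i < len(ys) and ys[i][0] < k:
--             i += 1
--         if i == len(ys) or ys[i][0] != k or v > ys[i][1]:
--             return False
--         i += 1
--     return True
-- ===== Notes on version B (the rewrite author's own statement) =====
-- stated objective: alternative
-- what changed: Replaces A's per-key membership-and-lookup loop over m1 by a sort-then-merge algorithm: both item lists are sorted by key and a single two-pointer merge scan decides key containment and the value comparison.
import Mathlib
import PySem

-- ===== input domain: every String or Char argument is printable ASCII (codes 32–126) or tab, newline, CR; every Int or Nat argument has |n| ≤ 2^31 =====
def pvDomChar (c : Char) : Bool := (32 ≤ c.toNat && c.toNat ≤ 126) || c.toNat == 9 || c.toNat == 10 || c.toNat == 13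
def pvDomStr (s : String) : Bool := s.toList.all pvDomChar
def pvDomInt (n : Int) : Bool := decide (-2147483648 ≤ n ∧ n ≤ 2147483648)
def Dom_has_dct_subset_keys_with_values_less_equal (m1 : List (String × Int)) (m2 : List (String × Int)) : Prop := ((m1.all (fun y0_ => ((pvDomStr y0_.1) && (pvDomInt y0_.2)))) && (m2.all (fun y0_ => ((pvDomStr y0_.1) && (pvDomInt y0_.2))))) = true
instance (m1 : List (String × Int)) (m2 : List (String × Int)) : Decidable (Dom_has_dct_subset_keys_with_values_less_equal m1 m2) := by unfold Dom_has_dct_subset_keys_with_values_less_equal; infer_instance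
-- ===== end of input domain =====

-- ===== PORT A =====
-- B replaces A's per-key membership-and-lookup loop by sort-by-key + a two-pointer merge scan
-- (alternative algorithm, same return value); Pre_ restricts to duplicate-free key lists (the
-- association lists that actually represent Python dicts).

-- shared dict primitive: first-match lookup in the association list (Python 'k in m2' / m2[k])
def pvLookup : List (String × Int) → String → Option Int
  | [], _ => none
  | (k, v) :: rest, x => if k = x then some v else pvLookup rest x

-- the 'for k, v in m1.items()' loop with its early returns, as structural recursion on m1
def pvLoopA (m2 : List (String × Int)) : List (String × Int) → Bool
  | [] => true
  | (k, v) :: rest =>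
    match pvLookup m2 k with          -- 'if k in m2' + the guarded 'm2[k]' access
    | some w => if v > w then false else pvLoopA m2 rest
    | none => false

def has_dct_subset_keys_with_values_less_equal (m1 : List (String × Int)) (m2 : List (String × Int)) : Bool :=
  pvLoopA m2 m1

-- ===== PORT B =====
-- the inner 'while i < len(ys) and ys[i][0] < k: i += 1' — advancing the pointer = dropping the scanned prefix
def pvSkip (k : String) : List (String × Int) → List (String × Int)
  | [] => []
  | (k', w) :: rest => if k' < k then pvSkip k rest else (k', w) :: rest

-- the 'for k, v in xs' loop over the sorted m1-items, carrying the remaining suffix of ys (the pointer i)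
def pvMerge : List (String × Int) → List (String × Int) → Bool
  | [], _ => true
  | (k, v) :: xs, ys =>
    match pvSkip k ys with
    | [] => false                                        -- 'i == len(ys)'
    | (k', w) :: rest =>
      if k' ≠ k ∨ v > w then false else pvMerge xs rest

def has_dct_subset_keys_with_values_less_equal_alt (m1 : List (String × Int)) (m2 : List (String × Int)) : Bool :=
  pvMerge (PySem.List.sorted m1 Prod.fst false) (PySem.List.sorted m2 Prod.fst false)

-- ===== PRECONDITION & SPEC =====
-- Pre_ excludes association lists with duplicate keys: they represent no Python dict (dict
-- construction collapses duplicates), so the first-match reading of such lists is unspecified.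
def Pre_has_dct_subset_keys_with_values_less_equal (m1 : List (String × Int)) (m2 : List (String × Int)) : Prop :=
  (m1.map Prod.fst).Nodup ∧ (m2.map Prod.fst).Nodup
instance (m1 : List (String × Int)) (m2 : List (String × Int)) : Decidable (Pre_has_dct_subset_keys_with_values_less_equal m1 m2) := by unfold Pre_has_dct_subset_keys_with_values_less_equal; infer_instance

def pvWitness_has_dct_subset_keys_with_values_less_equal : (List (String × Int)) × (List (String × Int)) :=
  ([("a", 1)], [("b", 0), ("a", 2)])

def Spec_has_dct_subset_keys_with_values_less_equal (m1 : List (String × Int)) (m2 : List (String × Int)) (out : Bool) : Prop := out = has_dct_subset_keys_with_values_less_equal_alt m1 m2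
instance (m1 : List (String × Int)) (m2 : List (String × Int)) (out : Bool) : Decidable (Spec_has_dct_subset_keys_with_values_less_equal m1 m2 out) := by unfold Spec_has_dct_subset_keys_with_values_less_equal; infer_instance

-- ===== CLAIM (what is proved, stated in full; the proofs are below) =====
def Claim_equal_has_dct_subset_keys_with_values_less_equal : Prop := ∀ (m1 : List (String × Int)) (m2 : List (String × Int)), Dom_has_dct_subset_keys_with_values_less_equal m1 m2 → Pre_has_dct_subset_keys_with_values_less_equal m1 m2 → Spec_has_dct_subset_keys_with_values_less_equal m1 m2 (has_dct_subset_keys_with_values_less_equal m1 m2)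

-- ===== LEMMAS AND PROOFS =====

-- the common specification both programs compute: every m1-item finds a ≥ value under its key in m2
def pvOk (m2 : List (String × Int)) (p : String × Int) : Bool :=
  match pvLookup m2 p.1 with
  | some w => decide (p.2 ≤ w)
  | none => false

theorem pvAll_ext (l : List (String × Int)) (p q : (String × Int) → Bool)
    (h : ∀ x ∈ l, p x = q x) : l.all p = l.all q := by
  induction l with
  | nil => rfl
  | cons a t ih =>
    simp only [List.all_cons, h a List.mem_cons_self,
      ih (fun x hx => h x (List.mem_cons_of_mem _ hx))]

theorem pvLoopA_eq_all (m2 m1 : List (String × Int)) : pvLoopA m2 m1 = m1.all (pvOk m2) := by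
  induction m1 with
  | nil => rfl
  | cons p rest ih =>
    obtain ⟨k, v⟩ := p
    simp only [pvLoopA, List.all_cons, pvOk]
    cases h : pvLookup m2 k with
    | none => simp
    | some w =>
      by_cases hv : v > w
      · simp [hv, not_le.mpr hv]
      · simp [hv, le_of_not_gt hv, ih]

theorem pvLookup_eq_none_of_forall (ys : List (String × Int)) (k : String)
    (h : ∀ p ∈ ys, p.1 ≠ k) : pvLookup ys k = none := by
  induction ys with
  | nil => rfl
  | cons q rest ih =>
    obtain ⟨k', w⟩ := q
    simp only [pvLookup, if_neg (h (k', w) List.mem_cons_self)]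
    exact ih (fun p hp => h p (List.mem_cons_of_mem _ hp))

theorem pvLookup_append_of_forall_ne (l1 l2 : List (String × Int)) (k : String)
    (h : ∀ p ∈ l1, p.1 ≠ k) : pvLookup (l1 ++ l2) k = pvLookup l2 k := by
  induction l1 with
  | nil => rfl
  | cons q rest ih =>
    obtain ⟨k', w⟩ := q
    simp only [List.cons_append, pvLookup, if_neg (h (k', w) List.mem_cons_self)]
    exact ih (fun p hp => h p (List.mem_cons_of_mem _ hp))

theorem pvLookup_eq_some_iff_mem (ys : List (String × Int)) (k : String) (v : Int)
    (hnd : (ys.map Prod.fst).Nodup) : pvLookup ys k = some v ↔ (k, v) ∈ ys := by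
  induction ys with
  | nil => simp [pvLookup]
  | cons q rest ih =>
    obtain ⟨k', w⟩ := q
    simp only [List.map_cons, List.nodup_cons, List.mem_map] at hnd
    obtain ⟨hnotin, hnd'⟩ := hnd
    by_cases hk : k' = k
    · subst hk
      constructor
      · intro hv
        simp [pvLookup] at hv
        subst hv
        exact List.mem_cons_self
      · intro hmem
        rcases List.mem_cons.mp hmem with heq | hmem'
        · cases heq
          simp [pvLookup]
        · exact absurd ⟨(k', v), hmem', rfl⟩ hnotin
    · simp only [pvLookup, if_neg hk, ih hnd', List.mem_cons, Prod.mk.injEq]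
      constructor
      · exact Or.inr
      · rintro (⟨hkk, -⟩ | hmem)
        · exact absurd hkk.symm hk
        · exact hmem

theorem pvLookup_eq_of_perm (l1 l2 : List (String × Int)) (k : String)
    (hp : l1.Perm l2) (hnd : (l1.map Prod.fst).Nodup) : pvLookup l1 k = pvLookup l2 k := by
  have hnd2 : (l2.map Prod.fst).Nodup := hnd.perm (hp.map Prod.fst)
  cases h : pvLookup l1 k with
  | some v =>
    have hm := (pvLookup_eq_some_iff_mem l1 k v hnd).mp h
    exact ((pvLookup_eq_some_iff_mem l2 k v hnd2).mpr (hp.mem_iff.mp hm)).symm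
  | none =>
    have hnotin : ∀ p ∈ l2, p.1 ≠ k := by
      intro p hp2 hk
      obtain ⟨k0, v0⟩ := p
      subst hk
      have hm1 : (k0, v0) ∈ l1 := hp.mem_iff.mpr hp2
      have := (pvLookup_eq_some_iff_mem l1 k0 v0 hnd).mpr hm1
      rw [h] at this
      simp at this
    exact (pvLookup_eq_none_of_forall l2 k hnotin).symm

theorem pvSkip_eq_dropWhile (k : String) (ys : List (String × Int)) :
    pvSkip k ys = ys.dropWhile (fun p => decide (p.1 < k)) := by
  induction ys with
  | nil => rfl
  | cons q rest ih =>
    obtain ⟨k', w⟩ := q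
    by_cases hk : k' < k
    · simp [pvSkip, List.dropWhile, hk, ih]
    · simp [pvSkip, List.dropWhile, hk]

theorem pvSkip_split (k : String) (ys : List (String × Int)) :
    ys = ys.takeWhile (fun p => decide (p.1 < k)) ++ pvSkip k ys := by
  rw [pvSkip_eq_dropWhile]; exact (List.takeWhile_append_dropWhile).symm

theorem pvLookup_pvSkip (k : String) (ys : List (String × Int)) :
    pvLookup (pvSkip k ys) k = pvLookup ys k := by
  conv_rhs => rw [pvSkip_split k ys]
  rw [pvLookup_append_of_forall_ne]
  intro p hp
  have := List.mem_takeWhile_imp hp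
  simp only [decide_eq_true_eq] at this
  exact ne_of_lt this

theorem pvLookup_pvSkip_of_lt (k x : String) (ys : List (String × Int)) (hkx : k < x) :
    pvLookup (pvSkip k ys) x = pvLookup ys x := by
  conv_rhs => rw [pvSkip_split k ys]
  rw [pvLookup_append_of_forall_ne]
  intro p hp
  have := List.mem_takeWhile_imp hp
  simp only [decide_eq_true_eq] at this
  exact ne_of_lt (lt_trans this hkx)

theorem pvSkip_sublist (k : String) (ys : List (String × Int)) : (pvSkip k ys).Sublist ys := by
  rw [pvSkip_eq_dropWhile]; exact List.dropWhile_sublist _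

theorem pvSkip_head_not_lt (k k' : String) (w : Int) (ys rest : List (String × Int))
    (h : pvSkip k ys = (k', w) :: rest) : ¬ k' < k := by
  induction ys with
  | nil => simp [pvSkip] at h
  | cons q t ih =>
    obtain ⟨a, b⟩ := q
    by_cases ha : a < k
    · rw [show pvSkip k ((a, b) :: t) = pvSkip k t by simp [pvSkip, ha]] at h
      exact ih h
    · rw [show pvSkip k ((a, b) :: t) = (a, b) :: t by simp [pvSkip, ha]] at h
      injection h with h1 h2
      injection h1 with hak hbw
      subst hak
      exact ha

-- the merge scan over key-strictly-sorted lists computes the all-items check against ys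
theorem pvMerge_eq_all : ∀ (xs ys : List (String × Int)),
    xs.Pairwise (fun a b => a.1 < b.1) → ys.Pairwise (fun a b => a.1 < b.1) →
    pvMerge xs ys = xs.all (pvOk ys) := by
  intro xs
  induction xs with
  | nil => intro ys _ _; rfl
  | cons p xs' ih =>
    intro ys hxs hys
    obtain ⟨k, v⟩ := p
    obtain ⟨hhead, hxs'⟩ := List.pairwise_cons.mp hxs
    cases hskip : pvSkip k ys with
    | nil =>
      have hnone : pvLookup ys k = none := by
        rw [← pvLookup_pvSkip k ys, hskip]; rfl
      simp [pvMerge, hskip, pvOk, hnone]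
    | cons q rest =>
      obtain ⟨k', w⟩ := q
      have hsub : ((k', w) :: rest).Sublist ys := hskip ▸ pvSkip_sublist k ys
      have hsorted : ((k', w) :: rest).Pairwise (fun a b => a.1 < b.1) := hys.sublist hsub
      obtain ⟨hrest_gt, hrest_sorted⟩ := List.pairwise_cons.mp hsorted
      have hnotlt : ¬ k' < k := pvSkip_head_not_lt k k' w ys rest hskip
      by_cases hk : k' = k
      · subst hk
        have hlook : pvLookup ys k' = some w := by
          rw [← pvLookup_pvSkip k' ys, hskip]
          simp [pvLookup]
        simp only [pvMerge, hskip, List.all_cons]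
        by_cases hv : v > w
        · rw [if_pos (Or.inr hv)]
          simp [pvOk, hlook, not_le.mpr hv]
        · rw [if_neg (by simp [hv])]
          have hle : v ≤ w := le_of_not_gt hv
          simp only [pvOk, hlook, hle, decide_true, Bool.true_and]
          rw [ih rest hxs' hrest_sorted]
          apply pvAll_ext
          intro p hp
          have hgt : k' < p.1 := hhead p hp
          have hlook_p : pvLookup ys p.1 = pvLookup rest p.1 := by
            rw [← pvLookup_pvSkip_of_lt k' p.1 ys hgt, hskip]
            simp only [pvLookup, if_neg (ne_of_lt hgt)]
          simp [pvOk, hlook_p]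
      · -- k' ≠ k and ¬ k' < k, so k < k' : the key k is absent from ys
        have hkk : k < k' := lt_of_le_of_ne (not_lt.mp hnotlt) (Ne.symm hk)
        have hnone : pvLookup ys k = none := by
          rw [← pvLookup_pvSkip k ys, hskip]
          simp only [pvLookup, if_neg hk]
          apply pvLookup_eq_none_of_forall
          intro p hp
          exact ne_of_gt (lt_trans hkk (hrest_gt p hp))
        simp only [pvMerge, hskip, List.all_cons]
        rw [if_pos (Or.inl hk)]
        simp [pvOk, hnone]

theorem keys_pairwise_lt_sorted (m : List (String × Int)) (hnd : (m.map Prod.fst).Nodup) :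
    (PySem.List.sorted m Prod.fst false).Pairwise (fun a b => a.1 < b.1) := by
  have hperm : (PySem.List.sorted m Prod.fst false).Perm m := PySem.List.sorted_perm m Prod.fst false
  have hnd' : ((PySem.List.sorted m Prod.fst false).map Prod.fst).Nodup :=
    hnd.perm (hperm.map Prod.fst).symm
  have hle : (PySem.List.sorted m Prod.fst false).Pairwise (fun a b => a.1 ≤ b.1) :=
    PySem.List.sorted_pairwise m Prod.fst
  rw [List.Nodup, List.pairwise_map] at hnd'
  exact (hle.and hnd').imp (fun h => lt_of_le_of_ne h.1 h.2)

-- ===== VERDICT (by name: the statement is the Claim_ definition above) =====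
theorem has_dct_subset_keys_with_values_less_equal_spec : Claim_equal_has_dct_subset_keys_with_values_less_equal := by
  intro m1 m2 _ hpre
  obtain ⟨hnd1, hnd2⟩ := hpre
  unfold Spec_has_dct_subset_keys_with_values_less_equal
  unfold has_dct_subset_keys_with_values_less_equal has_dct_subset_keys_with_values_less_equal_alt
  have hxs := keys_pairwise_lt_sorted m1 hnd1
  have hys := keys_pairwise_lt_sorted m2 hnd2
  rw [pvMerge_eq_all _ _ hxs hys, pvLoopA_eq_all]
  have hperm1 : m1.Perm (PySem.List.sorted m1 Prod.fst false) :=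
    (PySem.List.sorted_perm m1 Prod.fst false).symm
  rw [hperm1.all_eq]
  apply pvAll_ext
  intro p _
  have hlook : pvLookup m2 p.1 = pvLookup (PySem.List.sorted m2 Prod.fst false) p.1 :=
    pvLookup_eq_of_perm m2 _ p.1 (PySem.List.sorted_perm m2 Prod.fst false).symm hnd2
  simp [pvOk, hlook]
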